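-- pv_equiv track=rewrite | github.com/miliar/Code_Jam_Webscraper | solutions_python/Problem_181/2037.py | get_last_word
-- ===== SOURCE A (Python) =====
-- from collections import deque, namedtuple
--
-- WordThing = namedtuple('WordThing', ['word', 'next_chars'])
--
-- def get_last_word(s):
--     word_queue = deque()
--     word_queue.append(WordThing(word='', next_chars=s))
--     lastwords = set()
--     while len(word_queue):
--         thing = word_queue.popleft()
--         if thing.next_chars:
--             word_queue.append(WordThing(word=thing.word + thing.next_chars[0], next_chars=thing.next_chars[1:]))
--             word_queue.append(WordThing(word=thing.next_chars[0] + thing.word, next_chars=thing.next_chars[1:]))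
--         else:
--             lastwords.add(thing.word)
--     return sorted(lastwords)[-1]
-- ===== SOURCE B (Python) =====
-- def get_last_word(s):
--     # Greedy: the largest buildable word prepends c when c >= current first char,
--     # otherwise appends it.  O(n^2) string ops vs A's O(2^n) BFS enumeration.
--     word = ""
--     for c in s:
--         if word == "" or c >= word[0]:
--             word = c + word
--         else:
--             word = word + c
--     return word
-- ===== Notes on version B (the rewrite author's own statement) =====
-- stated objective: faster
-- what changed: A enumerates all 2^n front/back insertion outcomes with a BFS queue and takes the sorted-last (maximum) one; B builds the answer directly with the classic greedy rule (prepend c iff c >= current first character), never materialising the outcome set.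
import Mathlib
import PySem

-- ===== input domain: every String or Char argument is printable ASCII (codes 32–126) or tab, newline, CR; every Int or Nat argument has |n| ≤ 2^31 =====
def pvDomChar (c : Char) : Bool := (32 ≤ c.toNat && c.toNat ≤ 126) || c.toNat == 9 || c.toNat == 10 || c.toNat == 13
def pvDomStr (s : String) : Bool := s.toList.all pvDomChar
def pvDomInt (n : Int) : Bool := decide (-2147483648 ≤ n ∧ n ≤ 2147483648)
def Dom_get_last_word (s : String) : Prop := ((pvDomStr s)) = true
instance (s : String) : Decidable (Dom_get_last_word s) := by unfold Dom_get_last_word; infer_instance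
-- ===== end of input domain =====

-- B replaces A's O(2^n) BFS enumeration of all front/back insertion outcomes by the
-- direct greedy construction (prepend c iff c >= current first char); same return value.

-- ===== PORT A =====
def pvAMeasure (q : List (List Char × List Char)) : Nat :=
  (q.map (fun t => 3 ^ t.2.length)).sum

-- A's while loop: pop a (word, next_chars) pair from the front of the queue; a pair with
-- empty next_chars adds its word to the set, otherwise both one-char extensions
-- (word + c appended, c + word prepended) are pushed onto the back of the queue.
-- A's containers are kept as their standard Lean counterparts so that the port, like the
-- Python, evaluates on the inputs where A returns (the queue reaches 2^n entries):
-- collections.deque as the classic two-list functional queue (front, back; refill when the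
-- front runs out), set as Std.HashSet.  Values are unchanged: the pairs are popped in
-- exactly A's order and the set is only ever queried for its members.
def pvALoop : List (List Char × List Char) → List (List Char × List Char) →
    Std.HashSet (List Char) → Std.HashSet (List Char)
  | [], [], lastwords => lastwords
  | [], b :: back, lastwords => pvALoop ((b :: back).reverse) [] lastwords
  | (w, []) :: front, back, lastwords => pvALoop front back (lastwords.insert w)
  | (w, c :: rest) :: front, back, lastwords =>
      pvALoop front ((c :: w, rest) :: (w ++ [c], rest) :: back) lastwords
termination_by front back _ => (pvAMeasure (front ++ back.reverse), back.length)
decreasing_by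
  · simp [Prod.lex_iff, pvAMeasure]
  · simp [Prod.lex_iff, pvAMeasure]
  · have h3 : 0 < 3 ^ rest.length := by positivity
    simp [Prod.lex_iff, pvAMeasure, pow_succ]
    omega

-- Python's string '<' is the lexicographic order on the character lists
def pvLeB (a b : List Char) : Bool := decide (a ≤ b)

-- sorted(lastwords)[-1]: Python's sorted is timsort, a stable merge sort — List.mergeSort.
-- The set provably always contains at least one word (get_last_word_spec's proof shows it),
-- so Python's [-1] never raises; .getD [] is never taken.
def get_last_word (s : String) : String :=
  String.ofList ((PySem.List.pyGet?
    ((pvALoop [(([] : List Char), s.toList)] [] ∅).toList.mergeSort pvLeB) (-1)).getD [])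

-- ===== PORT B =====
-- one step of the greedy loop: 'if word == "" or c >= word[0]: word = c + word else: word = word + c'
def pvAltStep (w : List Char) (c : Char) : List Char :=
  match w with
  | [] => [c]
  | h :: _ => if h ≤ c then c :: w else w ++ [c]

def get_last_word_alt (s : String) : String :=
  String.ofList (s.toList.foldl pvAltStep [])

-- ===== PRECONDITION & SPEC =====
def Spec_get_last_word (s : String) (out : String) : Prop := out = get_last_word_alt s
instance (s : String) (out : String) : Decidable (Spec_get_last_word s out) := by unfold Spec_get_last_word; infer_instance

-- ===== CLAIM (what is proved, stated in full; the proofs are below) =====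
def Claim_equal_get_last_word : Prop := ∀ (s : String), Dom_get_last_word s → Spec_get_last_word s (get_last_word s)

-- ===== LEMMAS AND PROOFS =====

-- the lexicographic (Mathlib Lex) order on List Char, unfolded on cons
theorem pvCons_le_cons_iff (a b : Char) (l₁ l₂ : List Char) :
    (a :: l₁) ≤ (b :: l₂) ↔ a < b ∨ (a = b ∧ l₁ ≤ l₂) := by
  rw [le_iff_lt_or_eq, le_iff_lt_or_eq]
  constructor
  · rintro (h | h)
    · cases h with
      | cons h => exact Or.inr ⟨rfl, Or.inl h⟩
      | rel h => exact Or.inl h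
    · obtain ⟨rfl, rfl⟩ := List.cons.inj h
      exact Or.inr ⟨rfl, Or.inr rfl⟩
  · rintro (h | ⟨rfl, h | h⟩)
    · exact Or.inl (List.Lex.rel h)
    · exact Or.inl (List.Lex.cons h)
    · subst h; exact Or.inr rfl

-- the multiset of words reachable from state (w, cs): append or prepend each next char
def pvWords (w : List Char) : List Char → List (List Char)
  | [] => [w]
  | c :: cs => pvWords (w ++ [c]) cs ++ pvWords (c :: w) cs

-- the BFS loop collects exactly the reachable words of all queue entries
-- (the queue's entries, front to back, are front ++ back.reverse)
theorem pvMem_pvALoop (front back : List (List Char × List Char))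
    (lw : Std.HashSet (List Char)) (x : List Char) :
    x ∈ pvALoop front back lw ↔ x ∈ lw ∨ ∃ p ∈ front ++ back.reverse, x ∈ pvWords p.1 p.2 := by
  induction front, back, lw using pvALoop.induct with
  | case1 lw => simp [pvALoop]
  | case2 b back lw ih => simp only [pvALoop, ih]; simp
  | case3 w front back lw ih =>
      simp only [pvALoop, ih]
      simp only [pvWords, List.mem_append, List.mem_cons, List.not_mem_nil,
        Std.HashSet.mem_insert, beq_iff_eq, or_and_right, exists_or, exists_eq_left,
        or_false]
      constructor
      · rintro (⟨h | h⟩ | h | h)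
        · exact Or.inr (Or.inl (Or.inl h.symm))
        · exact Or.inl h
        · exact Or.inr (Or.inl (Or.inr h))
        · exact Or.inr (Or.inr h)
      · rintro (h | ⟨h | h⟩ | h)
        · exact Or.inl (Or.inr h)
        · exact Or.inl (Or.inl h.symm)
        · exact Or.inr (Or.inl h)
        · exact Or.inr (Or.inr h)
  | case4 w c rest front back lw ih =>
      simp only [pvALoop, ih]
      simp only [pvWords, List.reverse_cons, List.append_assoc, List.mem_append,
        List.mem_cons, List.not_mem_nil, or_and_right, exists_or, exists_eq_left,
        false_and, exists_false, or_false]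
      constructor
      · rintro (h | h | h | h | h)
        · exact Or.inl h
        · exact Or.inr (Or.inl (Or.inr h))
        · exact Or.inr (Or.inr h)
        · exact Or.inr (Or.inl (Or.inl (Or.inl h)))
        · exact Or.inr (Or.inl (Or.inl (Or.inr h)))
      · rintro (h | ⟨⟨h | h⟩ | h⟩ | h)
        · exact Or.inl h
        · exact Or.inr (Or.inr (Or.inr (Or.inl h)))
        · exact Or.inr (Or.inr (Or.inr (Or.inr h)))
        · exact Or.inr (Or.inl h)
        · exact Or.inr (Or.inr (Or.inl h))

-- the greedy word is one of the reachable words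
theorem pvGreedy_mem (cs : List Char) : ∀ (w : List Char), cs.foldl pvAltStep w ∈ pvWords w cs := by
  induction cs with
  | nil => intro w; simp [pvWords]
  | cons c cs ih =>
      intro w
      simp only [List.foldl_cons, pvWords, List.mem_append]
      match w with
      | [] => exact Or.inl (by simpa [pvAltStep] using ih [c])
      | h :: t =>
          by_cases hc : h ≤ c
          · exact Or.inr (by simpa [pvAltStep, hc] using ih (c :: h :: t))
          · exact Or.inl (by simpa [pvAltStep, hc] using ih (h :: t ++ [c]))

-- appending the same char preserves ≤ between words of equal length
theorem pvLe_append (w1 : List Char) : ∀ (w2 : List Char), w1.length = w2.length →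
    w1 ≤ w2 → ∀ x : Char, w1 ++ [x] ≤ w2 ++ [x] := by
  induction w1 with
  | nil =>
      intro w2 hlen _ x
      cases w2 with
      | nil => exact le_refl _
      | cons _ _ => simp at hlen
  | cons a t1 ih =>
      intro w2 hlen hle x
      cases w2 with
      | nil => simp at hlen
      | cons h t =>
          rw [pvCons_le_cons_iff] at hle
          rcases hle with hlt | ⟨heq, hle⟩
          · exact (pvCons_le_cons_iff _ _ _ _).mpr (Or.inl hlt)
          · subst heq
            exact (pvCons_le_cons_iff _ _ _ _).mpr
              (Or.inr ⟨rfl, ih t (by simpa using hlen) hle x⟩)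

-- if every char of w2 is ≤ c and w1 ≤ w2 (equal lengths), then w1 ++ [c] ≤ c :: w2
theorem pvAppend_le_cons (w1 : List Char) : ∀ (w2 : List Char) (c : Char),
    w1.length = w2.length → w1 ≤ w2 → (∀ d ∈ w2, d ≤ c) → w1 ++ [c] ≤ c :: w2 := by
  induction w1 with
  | nil =>
      intro w2 c hlen _ _
      cases w2 with
      | nil => exact le_refl _
      | cons _ _ => simp at hlen
  | cons a t1 ih =>
      intro w2 c hlen hle hall
      cases w2 with
      | nil => simp at hlen
      | cons h t =>
          rw [pvCons_le_cons_iff] at hle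
          have hhc : h ≤ c := hall h (by simp)
          rcases hle with hlt | ⟨heq, hle⟩
          · exact (pvCons_le_cons_iff _ _ _ _).mpr (Or.inl (lt_of_lt_of_le hlt hhc))
          · subst heq
            rcases lt_or_eq_of_le hhc with hlt | heq
            · exact (pvCons_le_cons_iff _ _ _ _).mpr (Or.inl hlt)
            · subst heq
              exact (pvCons_le_cons_iff _ _ _ _).mpr
                (Or.inr ⟨rfl, ih t a (by simpa using hlen) hle
                  (fun d hd => hall d (by simp [hd]))⟩)

-- every reachable word is ≤ the greedy result, for any greedy state w2 dominating w1
-- (the greedy invariant: the first char of w2 is its maximum)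
theorem pvWords_le_greedy (cs : List Char) : ∀ (w1 w2 : List Char),
    (∀ h t, w2 = h :: t → ∀ d ∈ w2, d ≤ h) → w1.length = w2.length → w1 ≤ w2 →
    ∀ x ∈ pvWords w1 cs, x ≤ cs.foldl pvAltStep w2 := by
  induction cs with
  | nil =>
      intro w1 w2 _ _ hle x hx
      simp only [pvWords, List.mem_singleton] at hx
      subst hx; simpa using hle
  | cons c cs ih =>
      intro w1 w2 hinv hlen hle x hx
      simp only [pvWords, List.mem_append] at hx
      simp only [List.foldl_cons]
      cases w2 with
      | nil =>
          have hw1 : w1 = [] := List.length_eq_zero_iff.mp (by simpa using hlen)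
          subst hw1
          have hstep : pvAltStep [] c = [c] := rfl
          rw [hstep]
          have hinv' : ∀ h t, ([c] : List Char) = h :: t → ∀ d ∈ [c], d ≤ h := by
            intro h t heq d hd
            obtain ⟨h1, -⟩ := List.cons.inj heq
            simp only [List.mem_singleton] at hd
            subst hd; exact le_of_eq h1
          rcases hx with hx | hx
          · exact ih [c] [c] hinv' rfl (le_refl _) x (by simpa using hx)
          · exact ih [c] [c] hinv' rfl (le_refl _) x (by simpa using hx)
      | cons h t =>
          have hall : ∀ d ∈ h :: t, d ≤ h := hinv h t rfl
          by_cases hc : h ≤ c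
          · have hstep : pvAltStep (h :: t) c = c :: h :: t := by simp [pvAltStep, hc]
            rw [hstep]
            have hinv' : ∀ h' t', (c :: h :: t : List Char) = h' :: t' →
                ∀ d ∈ c :: h :: t, d ≤ h' := by
              intro h' t' heq d hd
              obtain ⟨rfl, -⟩ := List.cons.inj heq
              rcases List.mem_cons.mp hd with rfl | hd
              · exact le_refl d
              · exact le_trans (hall d hd) hc
            rcases hx with hx | hx
            · exact ih (w1 ++ [c]) (c :: h :: t) hinv' (by simp [hlen])
                (pvAppend_le_cons w1 (h :: t) c hlen hle
                  (fun d hd => le_trans (hall d hd) hc)) x hx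
            · exact ih (c :: w1) (c :: h :: t) hinv' (by simp [hlen])
                ((pvCons_le_cons_iff _ _ _ _).mpr (Or.inr ⟨rfl, hle⟩)) x hx
          · have hstep : pvAltStep (h :: t) c = h :: t ++ [c] := by simp [pvAltStep, hc]
            rw [hstep]
            have hclt : c < h := lt_of_not_ge hc
            have hinv' : ∀ h' t', (h :: t ++ [c] : List Char) = h' :: t' →
                ∀ d ∈ h :: t ++ [c], d ≤ h' := by
              intro h' t' heq d hd
              obtain ⟨rfl, -⟩ := List.cons.inj heq
              rcases List.mem_cons.mp hd with rfl | hd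
              · exact le_refl d
              · rcases List.mem_append.mp hd with hd | hd
                · exact hall d (by simp [hd])
                · simp only [List.mem_singleton] at hd; subst hd; exact le_of_lt hclt
            rcases hx with hx | hx
            · exact ih (w1 ++ [c]) (h :: t ++ [c]) hinv' (by simp at hlen ⊢; omega)
                (by simpa using pvLe_append w1 (h :: t) hlen hle c) x hx
            · exact ih (c :: w1) (h :: t ++ [c]) hinv' (by simp at hlen ⊢; omega)
                ((pvCons_le_cons_iff _ _ _ _).mpr (Or.inl hclt)) x hx

-- sorted(S)[-1] is g when g ∈ S dominates every element of S
theorem pvMergeSort_last_eq_max (S : List (List Char)) (g : List Char)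
    (hg : g ∈ S) (hmax : ∀ x ∈ S, x ≤ g) :
    (PySem.List.pyGet? (S.mergeSort pvLeB) (-1)).getD [] = g := by
  have hperm : (S.mergeSort pvLeB).Perm S := List.mergeSort_perm S pvLeB
  have hpw : (S.mergeSort pvLeB).Pairwise (fun a b => a ≤ b) := by
    have h := List.pairwise_mergeSort (le := pvLeB)
      (fun a b c hab hbc => by
        simp only [pvLeB, decide_eq_true_eq] at hab hbc ⊢; exact le_trans hab hbc)
      (fun a b => by simp only [pvLeB, Bool.or_eq_true, decide_eq_true_eq]; exact le_total a b)
      S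
    exact h.imp (fun hab => by simpa [pvLeB] using hab)
  have hgs : g ∈ S.mergeSort pvLeB := hperm.mem_iff.mpr hg
  have hne : S.mergeSort pvLeB ≠ [] := List.ne_nil_of_mem hgs
  rw [PySem.List.pyGet?_neg_one, List.getLast?_eq_some_getLast hne, Option.getD_some]
  have hlast_mem : (S.mergeSort pvLeB).getLast hne ∈ S := hperm.mem_iff.mp (List.getLast_mem hne)
  have h1 : (S.mergeSort pvLeB).getLast hne ≤ g := hmax _ hlast_mem
  obtain ⟨p, hp, hpe⟩ := List.mem_iff_getElem.mp hgs
  have h2 : g ≤ (S.mergeSort pvLeB).getLast hne := by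
    rw [List.getLast_eq_getElem, ← hpe]
    rcases Nat.lt_or_ge p ((S.mergeSort pvLeB).length - 1) with hlt | hge
    · exact (List.pairwise_iff_getElem.mp hpw) p _ hp (by omega) hlt
    · have : p = (S.mergeSort pvLeB).length - 1 := by omega
      subst this; exact le_refl _
  exact le_antisymm h1 h2

-- ===== VERDICT (by name: the statement is the Claim_ definition above) =====
theorem get_last_word_spec : Claim_equal_get_last_word := by
  intro s _
  unfold Spec_get_last_word get_last_word get_last_word_alt
  congr 1
  have hmem : ∀ x, x ∈ (pvALoop [(([] : List Char), s.toList)] [] ∅).toList ↔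
      x ∈ pvWords [] s.toList := by
    intro x
    rw [Std.HashSet.mem_toList, pvMem_pvALoop]
    simp [Std.HashSet.not_mem_empty]
  apply pvMergeSort_last_eq_max
  · exact (hmem _).mpr (pvGreedy_mem s.toList [])
  · intro x hx
    exact pvWords_le_greedy s.toList [] [] (by simp) rfl (le_refl _) x ((hmem x).mp hx)
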